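-- pv_equiv track=rewrite | github.com/x-nunez/irv-multiple-winners-counter | IRVcounter.py | check_ballot
-- ===== SOURCE A (Python) =====
-- def check_ballot(ballot: list) -> tuple:
-- 	"""
-- 	Check if a ballot is valid, blank, or null.
-- 	A ballot is valid if:
-- 		- It has no candidates marked (blank), or
-- 		- The k marked candidates have rankings exactly {1, 2, ..., k}
-- 	Args:
-- 		ballot (list): A list of ranked candidates
-- 	Returns:
-- 		tuple: (cleaned_ballot, status) where cleaned_ballot has empty strings
-- 			removed and status is 'valid', 'blank', or 'null'
-- 	"""
-- 	aux = []
-- 	blank = False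
-- 	semiblank = False
-- 	for c in ballot:
-- 		if blank or semiblank:
-- 			if c != '':
-- 				return ballot, 'null'
-- 		elif c == '':
-- 			if len(aux) == 0:
-- 				blank = True
-- 			else:
-- 				semiblank = True
-- 		elif c not in aux:
-- 			aux.append(c)
-- 		else:
-- 			return ballot, 'null'
--
-- 	ballot = [c for c in ballot if c != '']
--
-- 	if blank:
-- 		return ballot, 'blank'
-- 	return ballot, 'valid'
-- ===== SOURCE B (Python) =====
-- def check_ballot(ballot: list) -> tuple:
--     """Reimplementation: closed-form checks instead of A's blank/semiblank state machine."""
--     cleaned = [c for c in ballot if c != '']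
--     # a marked candidate after a blank position <=> ballot is not "all marks, then all blanks"
--     if ballot != cleaned + [''] * (len(ballot) - len(cleaned)):
--         return ballot, 'null'
--     if len(cleaned) != len(set(cleaned)):
--         return ballot, 'null'
--     if not cleaned and ballot:
--         return cleaned, 'blank'
--     return cleaned, 'valid'
-- ===== Notes on version B (the rewrite author's own statement) =====
-- stated objective: simpler
-- what changed: Replaced A's blank/semiblank state-machine scan with early returns by three independent closed-form checks: a gap test (ballot equals its non-empty entries followed by padding blanks), a set-based duplicate test, and an emptiness test for 'blank'.
import Mathlib
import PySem

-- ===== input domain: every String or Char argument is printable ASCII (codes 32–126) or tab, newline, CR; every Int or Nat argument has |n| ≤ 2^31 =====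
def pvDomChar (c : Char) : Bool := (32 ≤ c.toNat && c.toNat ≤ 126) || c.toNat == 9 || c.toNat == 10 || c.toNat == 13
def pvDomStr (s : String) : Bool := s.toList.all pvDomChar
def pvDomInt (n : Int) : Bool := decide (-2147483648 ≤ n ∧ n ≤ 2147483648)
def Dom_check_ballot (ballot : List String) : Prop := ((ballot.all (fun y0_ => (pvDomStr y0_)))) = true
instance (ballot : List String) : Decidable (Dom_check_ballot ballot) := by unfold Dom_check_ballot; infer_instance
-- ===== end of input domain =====

-- ===== PORT A =====
-- B changes the algorithm: A's blank/semiblank state-machine scan becomes three independent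
-- closed-form checks (gap test by list equality, set-based duplicate test, emptiness test).
-- shared helper for Python's test `c != ''` (used by both ports' filters)
def isMark (c : String) : Bool := c ≠ ""

-- A's loop: state (aux, blank, semiblank); none = early 'null' return, some blank = loop finished.
def check_ballot_loop : List String → List String → Bool → Bool → Option Bool
  | [], _, blank, _ => some blank
  | c :: rest, aux, blank, semiblank =>
    if blank || semiblank then
      if c ≠ "" then none else check_ballot_loop rest aux blank semiblank
    else if c = "" then
      if aux.length = 0 then check_ballot_loop rest aux true semiblank
      else check_ballot_loop rest aux blank true
    else if ¬ (c ∈ aux) then check_ballot_loop rest (aux ++ [c]) blank semiblank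
    else none

def check_ballot (ballot : List String) : List String × String :=
  match check_ballot_loop ballot [] false false with
  | none => (ballot, "null")
  | some blank =>
    let ballot' := ballot.filter isMark
    if blank then (ballot', "blank") else (ballot', "valid")

-- ===== PORT B =====
def check_ballot_alt (ballot : List String) : List String × String :=
  let cleaned := ballot.filter isMark
  if ballot ≠ cleaned ++ List.replicate (ballot.length - cleaned.length) "" then
    (ballot, "null")
  else if cleaned.length ≠ (PySem.Set.ofList cleaned).length then
    (ballot, "null")
  else if cleaned = [] ∧ ballot ≠ [] then
    (cleaned, "blank")
  else
    (cleaned, "valid")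

-- ===== PRECONDITION & SPEC =====
def Spec_check_ballot (ballot : List String) (out : List String × String) : Prop := out = check_ballot_alt ballot
instance (ballot : List String) (out : List String × String) : Decidable (Spec_check_ballot ballot out) := by unfold Spec_check_ballot; infer_instance

-- ===== CLAIM (what is proved, stated in full; the proofs are below) =====
def Claim_equal_check_ballot : Prop := ∀ (ballot : List String), Dom_check_ballot ballot → Spec_check_ballot ballot (check_ballot ballot)

-- ===== LEMMAS AND PROOFS =====

theorem isMark_empty : isMark "" = false := rfl

theorem isMark_of_ne {c : String} (hc : c ≠ "") : isMark c = true := by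
  simp [isMark, hc]

theorem filter_cons_empty (l : List String) :
    ("" :: l).filter isMark = l.filter isMark := by
  rw [List.filter_cons, isMark_empty]
  simp

theorem filter_cons_mark {c : String} (l : List String) (hc : c ≠ "") :
    (c :: l).filter isMark = c :: l.filter isMark := by
  rw [List.filter_cons, isMark_of_ne hc]
  simp

theorem all_empty_filter {l : List String} (h : l.all (fun x => x == "") = true) :
    l.filter isMark = [] := by
  rw [List.filter_eq_nil_iff]
  intro a ha
  have := List.all_eq_true.mp h a ha
  simp [isMark]
  simpa using this

theorem all_empty_eq_replicate {l : List String} (h : l.all (fun x => x == "") = true) :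
    l = List.replicate l.length "" := by
  apply List.eq_replicate_of_mem
  intro b hb
  simpa using List.all_eq_true.mp h b hb

-- "no candidate after a blank", in cons-recursive form
def gapfreeB : List String → Bool
  | [] => true
  | c :: rest => if c = "" then rest.all (fun x => x == "") else gapfreeB rest

theorem gapfreeB_cons_empty (rest : List String) :
    gapfreeB ("" :: rest) = rest.all (fun x => x == "") := by
  simp [gapfreeB]

theorem gapfreeB_cons_ne (c : String) (rest : List String) (hc : c ≠ "") :
    gapfreeB (c :: rest) = gapfreeB rest := by
  simp [gapfreeB, hc]

theorem gapfree_iff (l : List String) :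
    gapfreeB l = true ↔
      l = l.filter isMark ++ List.replicate (l.length - (l.filter isMark).length) "" := by
  induction l with
  | nil => simp [gapfreeB]
  | cons c rest ih =>
    by_cases hc : c = ""
    · subst hc
      rw [gapfreeB_cons_empty]
      constructor
      · intro h
        have hf0 : ("" :: rest).filter isMark = [] := by
          rw [filter_cons_empty]; exact all_empty_filter h
        rw [hf0, List.nil_append, List.length_nil, Nat.sub_zero, List.length_cons,
          List.replicate_succ]
        exact congrArg ("" :: ·) (all_empty_eq_replicate h)
      · intro h
        rw [filter_cons_empty] at h
        cases hrf : rest.filter isMark with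
        | cons x xs =>
          rw [hrf, List.cons_append] at h
          have hx : x ≠ "" := by
            have hxm : x ∈ rest.filter isMark := by
              rw [hrf]; exact List.mem_cons_self
            have := List.of_mem_filter hxm
            simpa [isMark] using this
          exact absurd (List.head_eq_of_cons_eq h).symm hx
        | nil =>
          rw [hrf, List.nil_append, List.length_nil, Nat.sub_zero, List.length_cons,
            List.replicate_succ] at h
          have h2 : rest = List.replicate rest.length "" := List.tail_eq_of_cons_eq h
          rw [List.all_eq_true]
          intro x hx
          simpa using List.eq_of_mem_replicate (h2 ▸ hx)
    · rw [gapfreeB_cons_ne c rest hc, ih, filter_cons_mark rest hc]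
      simp only [List.cons_append, List.length_cons, Nat.add_sub_add_right, List.cons_eq_cons]
      simp

-- length accounting for building a Python set by folding Set.add
theorem len_foldl_add_le (xs : List String) : ∀ s : List String,
    (xs.foldl PySem.Set.add s).length ≤ s.length + xs.length := by
  induction xs with
  | nil => intro s; simp
  | cons x xs ih =>
    intro s
    simp only [List.foldl_cons]
    calc (xs.foldl PySem.Set.add (PySem.Set.add s x)).length
        ≤ (PySem.Set.add s x).length + xs.length := ih _
      _ ≤ (s.length + 1) + xs.length := by
          unfold PySem.Set.add PySem.Set.contains
          split <;> simp
      _ ≤ s.length + (x :: xs).length := by simp; omega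

theorem foldl_add_len_eq_iff (xs : List String) : ∀ s : List String, s.Nodup →
    ((xs.foldl PySem.Set.add s).length = s.length + xs.length ↔
      xs.Nodup ∧ ∀ x ∈ xs, x ∉ s) := by
  induction xs with
  | nil => intro s _; simp
  | cons x xs ih =>
    intro s hs
    simp only [List.foldl_cons]
    by_cases hx : x ∈ s
    · have hadd : PySem.Set.add s x = s := by
        unfold PySem.Set.add PySem.Set.contains
        simp [hx]
      rw [hadd]
      constructor
      · intro h
        exfalso
        have := len_foldl_add_le xs s
        simp only [List.length_cons] at h
        omega
      · rintro ⟨-, h2⟩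
        exact absurd hx (h2 x List.mem_cons_self)
    · have hadd : PySem.Set.add s x = s ++ [x] := by
        unfold PySem.Set.add PySem.Set.contains
        simp [hx]
      have hnd : (s ++ [x]).Nodup := by
        rw [List.nodup_append]
        refine ⟨hs, List.nodup_singleton x, ?_⟩
        intro a ha b hb
        rw [List.mem_singleton] at hb
        subst hb
        exact fun h => hx (h ▸ ha)
      have harith : s.length + (x :: xs).length = (s ++ [x]).length + xs.length := by
        simp
        omega
      rw [hadd, harith, ih _ hnd]
      simp only [List.nodup_cons, List.mem_cons, List.mem_append, not_or]
      constructor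
      · rintro ⟨hnodup, hmem⟩
        refine ⟨⟨fun hxx => (hmem x hxx).2.1 rfl, hnodup⟩, ?_⟩
        rintro y (rfl | hy)
        · exact hx
        · exact (hmem y hy).1
      · rintro ⟨⟨hxm, hnodup⟩, hmem⟩
        exact ⟨hnodup, fun y hy => ⟨hmem y (Or.inr hy), fun h => hxm (h ▸ hy), by simp⟩⟩

theorem set_len_iff_nodup (xs : List String) :
    xs.length = (PySem.Set.ofList xs).length ↔ xs.Nodup := by
  rw [PySem.Set.ofList_eq_foldl]
  constructor
  · intro hl
    exact ((foldl_add_len_eq_iff xs [] List.nodup_nil).mp (by simpa using hl.symm)).1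
  · intro hn
    have := (foldl_add_len_eq_iff xs [] List.nodup_nil).mpr ⟨hn, by simp⟩
    simpa using this.symm

-- one-step reductions of A's loop in the fresh (false,false) state
theorem loop_step_empty_auxnil (rest : List String) :
    check_ballot_loop ("" :: rest) [] false false = check_ballot_loop rest [] true false := by
  simp [check_ballot_loop]

theorem loop_step_empty_auxcons (rest aux : List String) (h : aux ≠ []) :
    check_ballot_loop ("" :: rest) aux false false = check_ballot_loop rest aux false true := by
  rw [check_ballot_loop]
  simp [List.length_eq_zero_iff, h]

theorem loop_step_mark_new {c : String} (rest aux : List String) (hc : c ≠ "") (hm : c ∉ aux) :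
    check_ballot_loop (c :: rest) aux false false
      = check_ballot_loop rest (aux ++ [c]) false false := by
  rw [check_ballot_loop]
  simp [hc, hm]

theorem loop_step_mark_dup {c : String} (rest aux : List String) (hc : c ≠ "") (hm : c ∈ aux) :
    check_ballot_loop (c :: rest) aux false false = none := by
  rw [check_ballot_loop]
  simp [hc, hm]

-- after a blank has been seen, the loop nulls iff any later mark is non-empty
theorem loop_blank_char (l : List String) : ∀ (aux : List String) (b s : Bool),
    (b || s) = true →
    check_ballot_loop l aux b s = if l.all (fun x => x == "") then some b else none := by
  induction l with
  | nil => intro aux b s _; simp [check_ballot_loop]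
  | cons c rest ih =>
    intro aux b s hbs
    rw [check_ballot_loop, if_pos hbs]
    by_cases hc : c = ""
    · subst hc
      simp only [ne_eq, not_true_eq_false, if_false, ih aux b s hbs]
      simp
    · simp [hc]

-- characterisation of the loop started in the fresh state
theorem loop_char (l : List String) : ∀ aux : List String, aux.Nodup →
    check_ballot_loop l aux false false =
      if gapfreeB l = true ∧ (aux ++ l.filter isMark).Nodup then
        some (decide (aux.length = 0 ∧ l.head? = some ""))
      else none := by
  induction l with
  | nil =>
    intro aux hnd
    simp [check_ballot_loop, gapfreeB, hnd]
  | cons c rest ih =>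
    intro aux hnd
    by_cases hc : c = ""
    · subst hc
      by_cases haux : aux = []
      · subst haux
        rw [loop_step_empty_auxnil, loop_blank_char rest [] true false rfl]
        by_cases hall : rest.all (fun x => x == "") = true
        · have hf : ("" :: rest).filter isMark = [] := by
            rw [filter_cons_empty]; exact all_empty_filter hall
          have hcond : gapfreeB ("" :: rest) = true ∧
              (([] : List String) ++ ("" :: rest).filter isMark).Nodup := by
            refine ⟨by rw [gapfreeB_cons_empty, hall], ?_⟩
            rw [hf]
            simp
          rw [if_pos hall, if_pos hcond]
          simp
        · rw [if_neg hall, if_neg]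
          rintro ⟨hg, -⟩
          rw [gapfreeB_cons_empty] at hg
          exact hall hg
      · rw [loop_step_empty_auxcons rest aux haux, loop_blank_char rest aux false true rfl]
        by_cases hall : rest.all (fun x => x == "") = true
        · have hf : ("" :: rest).filter isMark = [] := by
            rw [filter_cons_empty]; exact all_empty_filter hall
          have hcond : gapfreeB ("" :: rest) = true ∧
              (aux ++ ("" :: rest).filter isMark).Nodup := by
            refine ⟨by rw [gapfreeB_cons_empty, hall], ?_⟩
            rw [hf]
            simpa using hnd
          rw [if_pos hall, if_pos hcond]
          have hlen : aux.length ≠ 0 := by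
            simpa [List.length_eq_zero_iff] using haux
          simp [hlen]
        · rw [if_neg hall, if_neg]
          rintro ⟨hg, -⟩
          rw [gapfreeB_cons_empty] at hg
          exact hall hg
    · by_cases hmem : c ∈ aux
      · rw [loop_step_mark_dup rest aux hc hmem, if_neg]
        rintro ⟨-, hnd3⟩
        rw [filter_cons_mark rest hc, List.nodup_append] at hnd3
        exact hnd3.2.2 c hmem c List.mem_cons_self rfl
      · have hnd2 : (aux ++ [c]).Nodup := by
          rw [List.nodup_append]
          refine ⟨hnd, List.nodup_singleton c, ?_⟩
          intro a ha b hb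
          rw [List.mem_singleton] at hb
          subst hb
          exact fun h => hmem (h ▸ ha)
        rw [loop_step_mark_new rest aux hc hmem, ih (aux ++ [c]) hnd2]
        by_cases hcond : gapfreeB rest = true ∧ ((aux ++ [c]) ++ rest.filter isMark).Nodup
        · have hcond2 : gapfreeB (c :: rest) = true ∧ (aux ++ (c :: rest).filter isMark).Nodup := by
            refine ⟨by rw [gapfreeB_cons_ne c rest hc]; exact hcond.1, ?_⟩
            rw [filter_cons_mark rest hc]
            simpa [List.append_assoc] using hcond.2
          rw [if_pos hcond, if_pos hcond2]
          have e1 : decide ((aux ++ [c]).length = 0 ∧ rest.head? = some "") = false := by simp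
          have e2 : decide (aux.length = 0 ∧ (c :: rest).head? = some "") = false := by
            simp [hc]
          rw [e1, e2]
        · rw [if_neg hcond, if_neg]
          rintro ⟨hg, hnd3⟩
          apply hcond
          refine ⟨by rw [← gapfreeB_cons_ne c rest hc]; exact hg, ?_⟩
          rw [filter_cons_mark rest hc] at hnd3
          simpa [List.append_assoc] using hnd3

-- ===== VERDICT (by name: the statement is the Claim_ definition above) =====
theorem check_ballot_spec : Claim_equal_check_ballot := by
  intro ballot _
  unfold Spec_check_ballot check_ballot check_ballot_alt
  rw [loop_char ballot [] List.nodup_nil]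
  simp only [List.nil_append]
  by_cases hgap : gapfreeB ballot = true
  · have hB1eq : ballot = ballot.filter isMark ++
        List.replicate (ballot.length - (ballot.filter isMark).length) "" :=
      (gapfree_iff ballot).mp hgap
    by_cases hnd : (ballot.filter isMark).Nodup
    · rw [if_pos ⟨hgap, hnd⟩, if_neg (not_not_intro hB1eq),
        if_neg (not_not_intro ((set_len_iff_nodup _).mpr hnd))]
      by_cases hhead : ballot.head? = some ""
      · have hb : ballot.filter isMark = [] ∧ ballot ≠ [] := by
          cases hb' : ballot with
          | nil => rw [hb'] at hhead; simp at hhead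
          | cons x rest =>
            have hx : x = "" := by
              rw [hb'] at hhead
              simpa using hhead
            subst hx
            have hg : rest.all (fun x => x == "") = true := by
              rw [hb', gapfreeB_cons_empty] at hgap
              exact hgap
            refine ⟨?_, by simp⟩
            rw [filter_cons_empty]
            exact all_empty_filter hg
        rw [if_pos hb]
        simp [hhead, hb.1]
      · have hb : ¬ (ballot.filter isMark = [] ∧ ballot ≠ []) := by
          rintro ⟨hc0, hb0⟩
          cases hb' : ballot with
          | nil => exact hb0 hb'
          | cons x rest =>
            have hx : x ≠ "" := by
              intro hx
              apply hhead
              rw [hb', hx]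
              rfl
            have hxm : x ∈ ballot.filter isMark := by
              rw [hb', filter_cons_mark rest hx]
              exact List.mem_cons_self
            rw [hc0] at hxm
            simp at hxm
        rw [if_neg hb]
        simp [hhead]
    · rw [if_neg (fun h => hnd h.2), if_neg (not_not_intro hB1eq),
        if_pos (fun h => hnd ((set_len_iff_nodup _).mp h))]
  · rw [if_neg (fun h => hgap h.1),
      if_pos (fun h => hgap ((gapfree_iff ballot).mpr h))]
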